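-- pv_equiv track=rewrite | github.com/Ai-Whisperers/Comment-Analizer | shared/business/analysis_engine.py | assess_engagement_quality
-- ===== SOURCE A (Python) =====
-- from typing import List, Dict, Tuple
--
-- def assess_engagement_quality(total_comments: int, theme_counts: Dict) -> str:
--     """Assess the quality/depth of customer engagement"""
--     active_themes = len([theme for theme, count in theme_counts.items() if count > 0])
--
--     if total_comments > 100 and active_themes > 4:
--         return 'excelente'
--     elif total_comments > 50 and active_themes > 3:
--         return 'bueno'
--     elif total_comments > 20 and active_themes > 2:
--         return 'moderado'
--     else:
--         return 'basico'
-- ===== SOURCE B (Python) =====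
-- LABELS = ['basico', 'moderado', 'bueno', 'excelente']
--
-- def assess_engagement_quality(total_comments, theme_counts):
--     # Tier arithmetic: the thresholds are nested (100>50>20 and 4>3>2), so the
--     # first matching rule of the elif chain is exactly min(comment tier, theme tier).
--     active_themes = sum(count > 0 for count in theme_counts.values())
--     comment_tier = (total_comments > 20) + (total_comments > 50) + (total_comments > 100)
--     theme_tier = min(max(active_themes - 2, 0), 3)
--     return LABELS[min(comment_tier, theme_tier)]
-- ===== Notes on version B (the rewrite author's own statement) =====
-- stated objective: alternative
-- what changed: Replaced the ordered if/elif guard chain with arithmetic: compute a comment tier and a theme tier (0..3) from the nested thresholds and index a label table by min(comment_tier, theme_tier).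
import Mathlib
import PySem

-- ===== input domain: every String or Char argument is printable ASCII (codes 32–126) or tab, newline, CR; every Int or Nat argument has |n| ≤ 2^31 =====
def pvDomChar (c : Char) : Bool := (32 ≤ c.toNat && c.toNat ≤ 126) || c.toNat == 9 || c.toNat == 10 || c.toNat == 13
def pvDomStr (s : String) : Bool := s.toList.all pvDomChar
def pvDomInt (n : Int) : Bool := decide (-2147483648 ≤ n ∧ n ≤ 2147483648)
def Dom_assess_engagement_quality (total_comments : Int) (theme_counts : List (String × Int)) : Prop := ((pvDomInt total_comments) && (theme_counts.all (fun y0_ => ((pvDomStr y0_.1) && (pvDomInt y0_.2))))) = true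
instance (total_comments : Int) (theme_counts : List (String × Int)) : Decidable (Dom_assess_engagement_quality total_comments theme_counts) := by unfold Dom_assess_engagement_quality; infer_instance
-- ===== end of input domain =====

-- B (alternative): replaces A's ordered if/elif guard chain with tier arithmetic — a comment
-- tier and a theme tier in 0..3 indexing a label table via min(comment_tier, theme_tier).
-- ===== PORT A =====
def assess_engagement_quality (total_comments : Int) (theme_counts : List (String × Int)) : String :=
  let active_themes : Int := ((theme_counts.filter (fun tc => tc.2 > 0)).length : Int)
  if total_comments > 100 ∧ active_themes > 4 then "excelente"
  else if total_comments > 50 ∧ active_themes > 3 then "bueno"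
  else if total_comments > 20 ∧ active_themes > 2 then "moderado"
  else "basico"

-- ===== PORT B =====
def pvLabels : List String := ["basico", "moderado", "bueno", "excelente"]

def assess_engagement_quality_alt (total_comments : Int) (theme_counts : List (String × Int)) : String :=
  let active_themes : Int :=
    theme_counts.foldl (fun acc tc => acc + (if tc.2 > 0 then 1 else 0)) 0
  let comment_tier : Int :=
    (if total_comments > 20 then 1 else 0) + (if total_comments > 50 then 1 else 0)
      + (if total_comments > 100 then 1 else 0)
  let theme_tier : Int := min (max (active_themes - 2) 0) 3
  (PySem.List.pyGet? pvLabels (min comment_tier theme_tier)).getD ""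

-- ===== PRECONDITION & SPEC =====
def Spec_assess_engagement_quality (total_comments : Int) (theme_counts : List (String × Int)) (out : String) : Prop := out = assess_engagement_quality_alt total_comments theme_counts
instance (total_comments : Int) (theme_counts : List (String × Int)) (out : String) : Decidable (Spec_assess_engagement_quality total_comments theme_counts out) := by unfold Spec_assess_engagement_quality; infer_instance

-- ===== CLAIM (what is proved, stated in full; the proofs are below) =====
def Claim_equal_assess_engagement_quality : Prop := ∀ (total_comments : Int) (theme_counts : List (String × Int)), Dom_assess_engagement_quality total_comments theme_counts → Spec_assess_engagement_quality total_comments theme_counts (assess_engagement_quality total_comments theme_counts)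

-- ===== LEMMAS AND PROOFS =====

-- ===== VERDICT (by name: the statement is the Claim_ definition above) =====
-- B's fold counter equals A's filter-length counter
lemma pv_count_eq (l : List (String × Int)) (acc : Int) :
    l.foldl (fun acc tc => acc + (if tc.2 > 0 then 1 else 0)) acc
      = acc + ((l.filter (fun tc => tc.2 > 0)).length : Int) := by
  induction l generalizing acc with
  | nil => simp
  | cons h t ih =>
    simp only [List.foldl_cons, List.filter_cons]
    by_cases hp : h.2 > 0
    · simp [hp, ih]; ring
    · simp [hp, ih]

-- the elif chain equals the tier-arithmetic label lookup, for any counts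
lemma pv_pick (tc a : Int) :
    (if tc > 100 ∧ a > 4 then "excelente"
     else if tc > 50 ∧ a > 3 then "bueno"
     else if tc > 20 ∧ a > 2 then "moderado" else "basico")
      = (PySem.List.pyGet? pvLabels
          (min ((if tc > 20 then (1:Int) else 0) + (if tc > 50 then 1 else 0)
                  + (if tc > 100 then 1 else 0))
               (min (max (a - 2) 0) 3))).getD "" := by
  have ht : min (max (a - 2) 0) 3
      = (if a > 4 then (3:Int) else if a > 3 then 2 else if a > 2 then 1 else 0) := by
    split_ifs <;> omega
  rw [ht]
  split_ifs <;> first | rfl | omega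

-- ===== VERDICT (by name: the statement is the Claim_ definition above) =====
theorem assess_engagement_quality_spec : Claim_equal_assess_engagement_quality := by
  intro tc l _
  unfold Spec_assess_engagement_quality assess_engagement_quality assess_engagement_quality_alt
  rw [pv_count_eq, pv_pick]
  norm_num
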